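-- pv_equiv track=rewrite | github.com/keroger2k/impact | clients/panorama.py | service_matches
-- ===== SOURCE A (Python) =====
-- def resolve_service(
--     name:    str,
--     svc_obj: dict[str, list[tuple[str, str]]],
--     svc_grp: dict[str, list[str]],
--     visited: set | None = None,
-- ) -> list[tuple[str, str]]:
--     """Recursively expand a service name to [(protocol, port_str), ...]."""
--     if visited is None:
--         visited = set()
--     if name in visited:
--         return []
--     visited.add(name)
--
--     if name in svc_obj:
--         return list(svc_obj[name])
--     if name in svc_grp:
--         result = []
--         for member in svc_grp[name]:
--             result.extend(resolve_service(member, svc_obj, svc_grp, visited))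
--         return result
--     return []
--
-- def _port_in_portstr(query_port: int, port_str: str) -> bool:
--     """Check if query_port is covered by port_str."""
--     for segment in port_str.split(","):
--         segment = segment.strip()
--         if "-" in segment:
--             try:
--                 lo, hi = segment.split("-", 1)
--                 if int(lo) <= query_port <= int(hi):
--                     return True
--             except ValueError:
--                 pass
--         else:
--             try:
--                 if int(segment) == query_port:
--                     return True
--             except ValueError:
--                 pass
--     return False
--
-- def service_matches(
--     query_proto: str,
--     query_port:  int | None,
--     service_names: list[str],
--     svc_obj: dict[str, list[tuple[str, str]]],
--     svc_grp: dict[str, list[str]],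
-- ) -> bool:
--     """Return True if the query proto/port is covered by any service in service_names."""
--     if query_port is None:
--         return True
--
--     if not service_names or "any" in service_names or "application-default" in service_names:
--         return True
--
--     for svc_name in service_names:
--         for (proto, port_str) in resolve_service(svc_name, svc_obj, svc_grp):
--             if proto != "any" and query_proto != "any" and proto != query_proto:
--                 continue
--             if port_str == "any":
--                 return True
--             if _port_in_portstr(query_port, port_str):
--                 return True
--
--     return False
-- ===== SOURCE B (Python) =====
-- def _resolve_iter(name, svc_obj, svc_grp):
--     """Expand a service name with an explicit work-list instead of recursion."""
--     pairs = []
--     stack = [name]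
--     visited = set()
--     while stack:
--         n = stack.pop(0)
--         if n in visited:
--             continue
--         visited.add(n)
--         if n in svc_obj:
--             pairs.extend(svc_obj[n])
--         elif n in svc_grp:
--             stack = list(svc_grp[n]) + stack
--     return pairs
--
-- def _pair_matches(query_proto, query_port, proto, port_str):
--     if proto != "any" and query_proto != "any" and proto != query_proto:
--         return False
--     if port_str == "any":
--         return True
--     return _port_in_portstr(query_port, port_str)
--
-- def _port_in_portstr(query_port, port_str):
--     for segment in port_str.split(","):
--         segment = segment.strip()
--         if "-" in segment:
--             try:
--                 lo, hi = segment.split("-", 1)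
--                 if int(lo) <= query_port <= int(hi):
--                     return True
--             except ValueError:
--                 pass
--         else:
--             try:
--                 if int(segment) == query_port:
--                     return True
--             except ValueError:
--                 pass
--     return False
--
-- def service_matches(query_proto, query_port, service_names, svc_obj, svc_grp):
--     if query_port is None:
--         return True
--     if not service_names or "any" in service_names or "application-default" in service_names:
--         return True
--     return any(
--         _pair_matches(query_proto, query_port, proto, port_str)
--         for name in service_names
--         for (proto, port_str) in _resolve_iter(name, svc_obj, svc_grp)
--     )
-- ===== Notes on version B (the rewrite author's own statement) =====
-- stated objective: alternative
-- what changed: resolve_service's recursive expansion of service-group names is replaced by an explicit work-list loop with the same visited-set cycle protection and svc_obj-before-svc_grp precedence, and the two matching loops are folded into a single any() over the resolved (proto, port) pairs.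
import Mathlib
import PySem

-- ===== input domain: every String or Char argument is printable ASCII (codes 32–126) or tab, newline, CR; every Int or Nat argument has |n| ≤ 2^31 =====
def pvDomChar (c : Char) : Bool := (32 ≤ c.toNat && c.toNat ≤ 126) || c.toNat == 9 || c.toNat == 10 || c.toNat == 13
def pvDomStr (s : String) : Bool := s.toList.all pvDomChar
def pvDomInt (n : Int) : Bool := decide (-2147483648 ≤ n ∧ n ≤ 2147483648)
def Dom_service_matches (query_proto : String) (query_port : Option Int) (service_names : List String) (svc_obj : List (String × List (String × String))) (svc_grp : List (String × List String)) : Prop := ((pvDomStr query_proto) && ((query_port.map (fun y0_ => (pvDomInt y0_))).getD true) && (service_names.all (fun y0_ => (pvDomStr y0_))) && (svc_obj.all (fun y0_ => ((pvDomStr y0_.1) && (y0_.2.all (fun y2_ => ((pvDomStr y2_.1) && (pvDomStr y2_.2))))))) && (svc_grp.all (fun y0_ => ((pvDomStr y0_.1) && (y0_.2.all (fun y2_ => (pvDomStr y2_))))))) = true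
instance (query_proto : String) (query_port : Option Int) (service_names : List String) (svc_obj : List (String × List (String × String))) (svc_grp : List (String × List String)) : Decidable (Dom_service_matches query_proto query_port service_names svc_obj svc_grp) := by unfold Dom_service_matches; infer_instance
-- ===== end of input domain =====

-- B replaces resolve_service's recursion by an explicit work-list traversal (same visited-set
-- protection and svc_obj-before-svc_grp precedence) and folds the matching loops into any();
-- B replaces resolve_service's recursion by an explicit work-list traversal (same visited-set
-- protection and svc_obj-before-svc_grp precedence) and folds the matching loops into any();
-- objective: alternative (iterative instead of recursive).

-- shared helper: _port_in_portstr, identical in both Python versions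
def portInPortstrGo (q : Int) : List String → Bool
  | [] => false
  | s :: rest =>
    let seg := PySem.Str.strip s
    if PySem.Str.isIn "-" seg then
      match PySem.Str.splitMax? seg "-" 1 with
      | some (lo :: hi :: _) =>
        (match PySem.Int.ofStr? lo with
         | some a =>
            if a ≤ q then
              (match PySem.Int.ofStr? hi with
               | some b => if q ≤ b then true else portInPortstrGo q rest
               | none => portInPortstrGo q rest)   -- int(hi) raises ValueError → pass
            else portInPortstrGo q rest            -- chained comparison already False
         | none => portInPortstrGo q rest)         -- int(lo) raises ValueError → pass
      | _ => portInPortstrGo q rest                -- unreachable: "-" ∈ seg gives exactly two pieces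
    else
      match PySem.Int.ofStr? seg with
      | some a => if a == q then true else portInPortstrGo q rest
      | none => portInPortstrGo q rest             -- int(segment) raises ValueError → pass

def portInPortstr (q : Int) (portStr : String) : Bool :=
  match PySem.Str.split? portStr "," with
  | some segs => portInPortstrGo q segs
  | none => false                                  -- unreachable: separator "," is non-empty

-- ===== PORT A =====
-- resolve_service, recursive, the mutated visited set threaded through as state; resolveManyA
-- is the 'for member in svc_grp[name]' loop.  Fuel: each recursive level enters through an
-- unvisited svc_grp key which it marks visited before recursing, so the recursion depth never
-- exceeds svc_grp.length + 1 and the fuel-0 branch is unreachable at the fuel used below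
-- (the bridge lemma needs only unvisitedGrp < fuel).
mutual
def resolveA (svc_obj : List (String × List (String × String))) (svc_grp : List (String × List String)) : Nat → String → PySem.Set String → List (String × String) × PySem.Set String
  | 0, _, visited => ([], visited)
  | fuel + 1, name, visited =>
    if PySem.Set.contains visited name then ([], visited)
    else
      let v := PySem.Set.add visited name
      match (PySem.Dict.mk svc_obj).get? name with
      | some pairs => (pairs, v)
      | none =>
        match (PySem.Dict.mk svc_grp).get? name with
        | some members => resolveManyA svc_obj svc_grp fuel members ([], v)
        | none => ([], v)
termination_by fuel _ _ => (fuel, 0)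

def resolveManyA (svc_obj : List (String × List (String × String))) (svc_grp : List (String × List String)) : Nat → List String → List (String × String) × PySem.Set String → List (String × String) × PySem.Set String
  | _, [], st => st
  | fuel, m :: ms, st =>
    let r := resolveA svc_obj svc_grp fuel m st.2
    resolveManyA svc_obj svc_grp fuel ms (st.1 ++ r.1, r.2)
termination_by fuel ms _ => (fuel, ms.length + 1)
end

-- the inner 'for (proto, port_str) in …' loop with its continue/return control flow
def pairLoopA (query_proto : String) (q : Int) : List (String × String) → Bool
  | [] => false
  | (proto, portStr) :: rest =>
    if proto != "any" && query_proto != "any" && proto != query_proto then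
      pairLoopA query_proto q rest
    else if portStr == "any" then true
    else if portInPortstr q portStr then true
    else pairLoopA query_proto q rest

-- the outer 'for svc_name in service_names' loop
def svcLoopA (query_proto : String) (q : Int) (svc_obj : List (String × List (String × String))) (svc_grp : List (String × List String)) : List String → Bool
  | [] => false
  | n :: ns =>
    if pairLoopA query_proto q (resolveA svc_obj svc_grp (svc_grp.length + 1) n PySem.Set.empty).1 then true
    else svcLoopA query_proto q svc_obj svc_grp ns

def service_matches (query_proto : String) (query_port : Option Int) (service_names : List String) (svc_obj : List (String × List (String × String))) (svc_grp : List (String × List String)) : Bool :=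
  match query_port with
  | none => true
  | some q =>
    if service_names.isEmpty || service_names.contains "any" || service_names.contains "application-default" then true
    else svcLoopA query_proto q svc_obj svc_grp service_names

-- ===== PORT B =====
-- number of svc_grp keys not yet visited: the termination measure of the work-list loop
def unvisitedGrp (svc_grp : List (String × List String)) (v : PySem.Set String) : Nat :=
  (svc_grp.map Prod.fst).countP (fun k => !(PySem.Set.contains v k))

-- termination helpers for loopB (cited in decreasing_by)
theorem contains_add_of (v : PySem.Set String) (n k : String)
    (h : PySem.Set.contains v k = true) : PySem.Set.contains (PySem.Set.add v n) k = true := by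
  simp only [PySem.Set.add]
  split <;> simp_all [PySem.Set.contains]

theorem contains_add_self (v : PySem.Set String) (n : String) :
    PySem.Set.contains (PySem.Set.add v n) n = true := by
  simp only [PySem.Set.add]
  split <;> simp_all [PySem.Set.contains]

theorem countP_le_of_imp (l : List String) (p q : String → Bool)
    (himp : ∀ k, p k = true → q k = true) : l.countP p ≤ l.countP q := by
  induction l with
  | nil => simp
  | cons a l ih =>
    simp only [List.countP_cons]
    by_cases hp : p a = true
    · simp [hp, himp a hp]; omega
    · simp only [Bool.not_eq_true] at hp
      simp [hp]
      split <;> omega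

theorem countP_lt_of_imp (l : List String) (p q : String → Bool)
    (himp : ∀ k, p k = true → q k = true) (n : String) (hmem : n ∈ l)
    (hp : p n = false) (hq : q n = true) : l.countP p < l.countP q := by
  induction l with
  | nil => simp at hmem
  | cons a l ih =>
    simp only [List.countP_cons]
    rcases List.mem_cons.mp hmem with rfl | hmem'
    · have hle := countP_le_of_imp l p q himp
      simp [hp, hq]; omega
    · have hlt := ih hmem'
      by_cases hpa : p a = true
      · simp [hpa, himp a hpa]; omega
      · simp only [Bool.not_eq_true] at hpa
        simp [hpa]
        split <;> omega

theorem unvisitedGrp_add_le (svc_grp : List (String × List String)) (v : PySem.Set String) (n : String) :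
    unvisitedGrp svc_grp (PySem.Set.add v n) ≤ unvisitedGrp svc_grp v := by
  refine countP_le_of_imp _ _ _ (fun k hk => ?_)
  rw [Bool.not_eq_true'] at hk ⊢
  cases hcv : PySem.Set.contains v k with
  | false => rfl
  | true => rw [contains_add_of v n k hcv] at hk; exact hk

theorem unvisitedGrp_add_lt (svc_grp : List (String × List String)) (v : PySem.Set String) (n : String)
    (hmem : n ∈ svc_grp.map Prod.fst) (hnv : PySem.Set.contains v n = false) :
    unvisitedGrp svc_grp (PySem.Set.add v n) < unvisitedGrp svc_grp v := by
  refine countP_lt_of_imp _ _ _ (fun k hk => ?_) n hmem ?_ ?_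
  · rw [Bool.not_eq_true'] at hk ⊢
    cases hcv : PySem.Set.contains v k with
    | false => rfl
    | true => rw [contains_add_of v n k hcv] at hk; exact hk
  · rw [contains_add_self v n]; rfl
  · rw [hnv]; rfl

theorem mem_fst_of_get?_some {α : Type} (g : List (String × α)) (n : String) (x : α)
    (h : (PySem.Dict.mk g).get? n = some x) : n ∈ g.map Prod.fst := by
  simp only [PySem.Dict.get?, Option.map_eq_some_iff] at h
  obtain ⟨p, hp, _⟩ := h
  have hmem := List.mem_of_find?_eq_some hp
  have heq : p.1 = n := by simpa using List.find?_some hp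
  subst heq
  exact List.mem_map.mpr ⟨p, hmem, rfl⟩

-- the explicit work-list traversal of Source B's _resolve_iter
def loopB (svc_obj : List (String × List (String × String))) (svc_grp : List (String × List String)) : List String → PySem.Set String → List (String × String) → List (String × String)
  | [], _, pairs => pairs
  | n :: stack, v, pairs =>
    if h : PySem.Set.contains v n then loopB svc_obj svc_grp stack v pairs
    else
      let v' := PySem.Set.add v n
      match hobj : (PySem.Dict.mk svc_obj).get? n with
      | some ps => loopB svc_obj svc_grp stack v' (pairs ++ ps)
      | none =>
        match hgrp : (PySem.Dict.mk svc_grp).get? n with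
        | some members => loopB svc_obj svc_grp (members ++ stack) v' pairs
        | none => loopB svc_obj svc_grp stack v' pairs
termination_by stack v _ => (unvisitedGrp svc_grp v, stack.length)
decreasing_by
  · exact Prod.Lex.right _ (by simp)
  · rcases Nat.lt_or_eq_of_le (unvisitedGrp_add_le svc_grp v n) with hlt | heq
    · exact Prod.Lex.left _ _ hlt
    · rw [heq]; exact Prod.Lex.right _ (by simp)
  · exact Prod.Lex.left _ _ (unvisitedGrp_add_lt svc_grp v n (mem_fst_of_get?_some _ _ _ hgrp) (by simpa using h))
  · rcases Nat.lt_or_eq_of_le (unvisitedGrp_add_le svc_grp v n) with hlt | heq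
    · exact Prod.Lex.left _ _ hlt
    · rw [heq]; exact Prod.Lex.right _ (by simp)

def resolveIter (svc_obj : List (String × List (String × String))) (svc_grp : List (String × List String)) (name : String) : List (String × String) :=
  loopB svc_obj svc_grp [name] PySem.Set.empty []

def pairMatch (query_proto : String) (q : Int) (pr : String × String) : Bool :=
  if pr.1 != "any" && query_proto != "any" && pr.1 != query_proto then false
  else if pr.2 == "any" then true
  else portInPortstr q pr.2

def service_matches_alt (query_proto : String) (query_port : Option Int) (service_names : List String) (svc_obj : List (String × List (String × String))) (svc_grp : List (String × List String)) : Bool :=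
  match query_port with
  | none => true
  | some q =>
    if service_names.isEmpty || service_names.contains "any" || service_names.contains "application-default" then true
    else service_names.any (fun name =>
      (resolveIter svc_obj svc_grp name).any (fun pr => pairMatch query_proto q pr))

-- ===== PRECONDITION & SPEC =====
def Spec_service_matches (query_proto : String) (query_port : Option Int) (service_names : List String) (svc_obj : List (String × List (String × String))) (svc_grp : List (String × List String)) (out : Bool) : Prop := out = service_matches_alt query_proto query_port service_names svc_obj svc_grp
instance (query_proto : String) (query_port : Option Int) (service_names : List String) (svc_obj : List (String × List (String × String))) (svc_grp : List (String × List String)) (out : Bool) : Decidable (Spec_service_matches query_proto query_port service_names svc_obj svc_grp out) := by unfold Spec_service_matches; infer_instance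

-- ===== CLAIM (what is proved, stated in full; the proofs are below) =====
def Claim_equal_service_matches : Prop := ∀ (query_proto : String) (query_port : Option Int) (service_names : List String) (svc_obj : List (String × List (String × String))) (svc_grp : List (String × List String)), Dom_service_matches query_proto query_port service_names svc_obj svc_grp → Spec_service_matches query_proto query_port service_names svc_obj svc_grp (service_matches query_proto query_port service_names svc_obj svc_grp)

-- ===== LEMMAS AND PROOFS =====

-- the visited set only grows along resolveA / resolveManyA
theorem resolveA_contains_mono (svc_obj : List (String × List (String × String))) (svc_grp : List (String × List String)) :
    ∀ (fuel : Nat),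
      (∀ (name : String) (v : PySem.Set String) (k : String),
        PySem.Set.contains v k = true → PySem.Set.contains (resolveA svc_obj svc_grp fuel name v).2 k = true)
      ∧ (∀ (ms : List String) (st : List (String × String) × PySem.Set String) (k : String),
        PySem.Set.contains st.2 k = true → PySem.Set.contains (resolveManyA svc_obj svc_grp fuel ms st).2 k = true) := by
  intro fuel
  induction fuel with
  | zero =>
    have hA : ∀ (name : String) (v : PySem.Set String) (k : String),
        PySem.Set.contains v k = true → PySem.Set.contains (resolveA svc_obj svc_grp 0 name v).2 k = true := by
      intro name v k h; simpa [resolveA] using h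
    refine ⟨hA, ?_⟩
    intro ms
    induction ms with
    | nil => intro st k h; simpa [resolveManyA] using h
    | cons m ms ihm =>
      intro st k h
      rw [resolveManyA]
      exact ihm _ k (hA m st.2 k h)
  | succ f ih =>
    have hA : ∀ (name : String) (v : PySem.Set String) (k : String),
        PySem.Set.contains v k = true → PySem.Set.contains (resolveA svc_obj svc_grp (f + 1) name v).2 k = true := by
      intro name v k h
      rw [resolveA]
      split
      · exact h
      · have h' := contains_add_of v name k h
        cases hobj : (PySem.Dict.mk svc_obj).get? name with
        | some ps => simpa [hobj] using h'
        | none =>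
          cases hgrp : (PySem.Dict.mk svc_grp).get? name with
          | some members =>
            simp only [hobj, hgrp]
            exact ih.2 members ([], PySem.Set.add v name) k h'

          | none => simpa [hobj, hgrp] using h'
    refine ⟨hA, ?_⟩
    intro ms
    induction ms with
    | nil => intro st k h; simpa [resolveManyA] using h
    | cons m ms ihm =>
      intro st k h
      rw [resolveManyA]
      exact ihm _ k (hA m st.2 k h)

theorem resolveA_K_le (svc_obj : List (String × List (String × String))) (svc_grp : List (String × List String))
    (fuel : Nat) (name : String) (v : PySem.Set String) :
    unvisitedGrp svc_grp (resolveA svc_obj svc_grp fuel name v).2 ≤ unvisitedGrp svc_grp v := by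
  refine countP_le_of_imp _ _ _ (fun k hk => ?_)
  rw [Bool.not_eq_true'] at hk ⊢
  cases hcv : PySem.Set.contains v k with
  | false => rfl
  | true => rw [(resolveA_contains_mono svc_obj svc_grp fuel).1 name v k hcv] at hk; exact hk

-- the 'for member' loop splits off its pair accumulator
theorem resolveManyA_acc_split (svc_obj : List (String × List (String × String))) (svc_grp : List (String × List String)) (fuel : Nat) :
    ∀ (ms : List String) (a : List (String × String)) (v : PySem.Set String),
      resolveManyA svc_obj svc_grp fuel ms (a, v)
      = (a ++ (resolveManyA svc_obj svc_grp fuel ms ([], v)).1,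
         (resolveManyA svc_obj svc_grp fuel ms ([], v)).2) := by
  intro ms
  induction ms with
  | nil => intro a v; simp [resolveManyA]
  | cons m ms ih =>
    intro a v
    rw [resolveManyA, resolveManyA]
    dsimp only
    rw [List.nil_append]
    rw [ih (a ++ (resolveA svc_obj svc_grp fuel m v).1) ((resolveA svc_obj svc_grp fuel m v).2),
        ih ((resolveA svc_obj svc_grp fuel m v).1) ((resolveA svc_obj svc_grp fuel m v).2)]
    simp [List.append_assoc]

-- the bridge: processing one name on the work-list equals one recursive expansion
theorem bridge (svc_obj : List (String × List (String × String))) (svc_grp : List (String × List String)) :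
    ∀ (fuel : Nat) (v : PySem.Set String) (name : String) (stack : List String) (acc : List (String × String)),
      unvisitedGrp svc_grp v < fuel →
      loopB svc_obj svc_grp (name :: stack) v acc
        = loopB svc_obj svc_grp stack (resolveA svc_obj svc_grp fuel name v).2
            (acc ++ (resolveA svc_obj svc_grp fuel name v).1) := by
  intro fuel
  induction fuel with
  | zero => intro v name stack acc h; exact absurd h (Nat.not_lt_zero _)
  | succ f ih =>
    have bridgeList : ∀ (ms : List String), ∀ (stack : List String) (v : PySem.Set String) (acc : List (String × String)),
        unvisitedGrp svc_grp v < f →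
        loopB svc_obj svc_grp (ms ++ stack) v acc
          = loopB svc_obj svc_grp stack (resolveManyA svc_obj svc_grp f ms ([], v)).2
              (acc ++ (resolveManyA svc_obj svc_grp f ms ([], v)).1) := by
      intro ms
      induction ms with
      | nil => intro stack v acc h; simp [resolveManyA]
      | cons m ms ihm =>
        intro stack v acc h
        rw [List.cons_append, ih v m (ms ++ stack) acc h,
            ihm stack ((resolveA svc_obj svc_grp f m v).2) (acc ++ (resolveA svc_obj svc_grp f m v).1)
              (lt_of_le_of_lt (resolveA_K_le svc_obj svc_grp f m v) h)]
        rw [resolveManyA]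
        dsimp only
        rw [List.nil_append]
        rw [resolveManyA_acc_split svc_obj svc_grp f ms ((resolveA svc_obj svc_grp f m v).1) ((resolveA svc_obj svc_grp f m v).2)]
        simp [List.append_assoc]
    intro v name stack acc h
    rw [loopB, resolveA]
    split_ifs with hc
    · simp
    · split
      · rename_i ps hobj
        simp [hobj]
      · rename_i hobj
        split
        · rename_i members hgrp
          simp only [hobj, hgrp]
          have hmem : name ∈ svc_grp.map Prod.fst := mem_fst_of_get?_some _ _ _ hgrp
          have hlt : unvisitedGrp svc_grp (PySem.Set.add v name) < f :=
            lt_of_lt_of_le (unvisitedGrp_add_lt svc_grp v name hmem (by simpa using hc)) (Nat.lt_succ_iff.mp h)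
          simpa using bridgeList members stack (PySem.Set.add v name) acc hlt
        · rename_i hgrp
          simp [hobj, hgrp]

theorem resolveIter_eq (svc_obj : List (String × List (String × String))) (svc_grp : List (String × List String)) (name : String) :
    resolveIter svc_obj svc_grp name = (resolveA svc_obj svc_grp (svc_grp.length + 1) name PySem.Set.empty).1 := by
  unfold resolveIter
  have hK : unvisitedGrp svc_grp PySem.Set.empty < svc_grp.length + 1 := by
    have h1 : unvisitedGrp svc_grp PySem.Set.empty ≤ (svc_grp.map Prod.fst).length := List.countP_le_length
    simp only [List.length_map] at h1
    omega
  rw [bridge svc_obj svc_grp (svc_grp.length + 1) PySem.Set.empty name [] [] hK, loopB]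
  simp

theorem pairLoopA_eq_any (query_proto : String) (q : Int) (l : List (String × String)) :
    pairLoopA query_proto q l = l.any (fun pr => pairMatch query_proto q pr) := by
  induction l with
  | nil => simp [pairLoopA]
  | cons p rest ih =>
    obtain ⟨proto, portStr⟩ := p
    rw [pairLoopA, List.any_cons, ← ih]
    have hm : pairMatch query_proto q (proto, portStr)
        = (if proto != "any" && query_proto != "any" && proto != query_proto then false
           else if portStr == "any" then true
           else portInPortstr q portStr) := rfl
    rw [hm]
    split_ifs with h1 h2 h3 <;> simp [*]

theorem svcLoopA_eq_any (query_proto : String) (q : Int) (svc_obj : List (String × List (String × String))) (svc_grp : List (String × List String)) (ns : List String) :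
    svcLoopA query_proto q svc_obj svc_grp ns
      = ns.any (fun name => (resolveIter svc_obj svc_grp name).any (fun pr => pairMatch query_proto q pr)) := by
  induction ns with
  | nil => simp [svcLoopA]
  | cons n ns ih =>
    rw [svcLoopA, pairLoopA_eq_any, ← resolveIter_eq, List.any_cons]
    by_cases hX : (resolveIter svc_obj svc_grp n).any (fun pr => pairMatch query_proto q pr)
    · simp [hX]
    · simp [hX, ih]

-- ===== VERDICT (by name: the statement is the Claim_ definition above) =====
theorem service_matches_spec : Claim_equal_service_matches := by
  intro query_proto query_port service_names svc_obj svc_grp _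
  unfold Spec_service_matches service_matches service_matches_alt
  cases query_port with
  | none => rfl
  | some q =>
    simp only
    split_ifs with h
    · rfl
    · exact svcLoopA_eq_any query_proto q svc_obj svc_grp service_names
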